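-- pv_equiv track=rewrite | github.com/pisitponjanton/IT-KMITL | PSCP-Y-1/Final Mock Exam Round #1/B RNG.py | max_sum_from_list
-- ===== SOURCE A (Python) =====
-- def max_sum_from_list(lst, n, s):
--     """[Mock Final 2022] B RNG"""
--     max_sum = 0
--     length = len(lst)
--     for i in range(length):
--         current_sum = 0
--         visited = set()
--         position = i
--         for j in range(n):
--             if position in visited:
--                 break
--             visited.add(position)
--             current_sum += lst[position]
--             position = (position + s) % length
--         max_sum = max(max_sum, current_sum)
--     return max_sum
-- ===== SOURCE B (Python) =====
-- def max_sum_from_list(lst, n, s):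
--     """[Mock Final 2022] B RNG -- gcd-cycle decomposition + prefix sums, O(len(lst))."""
--     L = len(lst)
--     if L == 0 or n <= 0:
--         return 0
--     a, b = abs(s) % L, L
--     while b:
--         a, b = b, a % b
--     g = a                      # gcd(s, L)
--     c = L // g                 # cycle length of i -> (i + s) % L
--     w = min(n, c)              # steps actually taken before a revisit
--     best = 0
--     for r in range(g):
--         vals = []
--         p = r
--         for _ in range(c):
--             vals.append(lst[p])
--             p = (p + s) % L
--         pref = [0]
--         for x in vals + vals:
--             pref.append(pref[-1] + x)
--         for j in range(c):
--             best = max(best, pref[j + w] - pref[j])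
--     return best
-- ===== Notes on version B (the rewrite author's own statement) =====
-- stated objective: faster
-- what changed: Instead of re-walking up to n steps from every start with a visited set, B decomposes the step map i -> (i+s)%L into its gcd(s,L) cycles of length c=L/gcd, observes every walk sums a window of min(n,c) consecutive cycle elements, and takes the best window via prefix sums over each doubled cycle in one pass.
import Mathlib
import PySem

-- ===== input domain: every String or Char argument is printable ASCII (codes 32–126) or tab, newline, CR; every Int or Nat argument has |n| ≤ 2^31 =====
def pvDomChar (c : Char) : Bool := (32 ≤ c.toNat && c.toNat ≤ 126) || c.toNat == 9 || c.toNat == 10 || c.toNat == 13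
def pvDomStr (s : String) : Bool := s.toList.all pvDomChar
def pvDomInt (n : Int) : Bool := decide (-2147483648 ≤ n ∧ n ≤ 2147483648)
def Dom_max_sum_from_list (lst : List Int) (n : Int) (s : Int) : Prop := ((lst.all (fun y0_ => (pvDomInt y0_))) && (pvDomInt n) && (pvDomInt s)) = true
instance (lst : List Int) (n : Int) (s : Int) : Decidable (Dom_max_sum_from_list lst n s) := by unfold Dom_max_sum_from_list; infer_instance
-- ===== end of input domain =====

-- B replaces A's per-start walk (with a visited set) by a gcd-cycle decomposition with prefix
-- sums over each doubled cycle — an asymptotically faster exact algorithm (measured faster).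
-- Every list index either program uses is provably in [0, len), so the Option returned by
-- pyGet? is discharged with `.getD 0` (the default is dead code).

-- ===== PORT A =====
def pvGetI (lst : List Int) (p : Int) : Int := (PySem.List.pyGet? lst p).getD 0

-- the inner `for j in range(n)` loop with its visited-set break
def pvAInner (lst : List Int) (s : Int) : Nat → Int → PySem.Set Int → Int → Int
  | 0, cur, _, _ => cur
  | f+1, cur, vis, p =>
    if PySem.Set.contains vis p then cur
    else pvAInner lst s f (cur + pvGetI lst p) (PySem.Set.add vis p)
           ((p + s).emod (lst.length : Int))

def max_sum_from_list (lst : List Int) (n : Int) (s : Int) : Int :=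
  (List.range lst.length).foldl
    (fun (mx : Int) (i : Nat) => max mx (pvAInner lst s n.toNat 0 PySem.Set.empty (i : Int))) 0

-- ===== PORT B =====
-- Euclid loop `while b: a, b = b, a % b`
def pvBGcd (a b : Nat) : Nat :=
  if b = 0 then a else pvBGcd b (a % b)
termination_by b
decreasing_by exact Nat.mod_lt _ (Nat.pos_of_ne_zero (by assumption))

-- the `for _ in range(c)` loop collecting one cycle's values
def pvBCycle (lst : List Int) (s : Int) : Nat → Int → List Int
  | 0, _ => []
  | k+1, p => pvGetI lst p :: pvBCycle lst s k ((p + s).emod (lst.length : Int))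

def max_sum_from_list_alt (lst : List Int) (n : Int) (s : Int) : Int :=
  let L := lst.length
  if L = 0 ∨ n ≤ 0 then 0
  else
    let g := pvBGcd (s.natAbs % L) L
    let c := L / g
    let w : Int := min n (c : Int)
    (List.range g).foldl (fun (best : Int) (r : Nat) =>
      let vals := pvBCycle lst s c (r : Int)
      let pref := (vals ++ vals).foldl (fun pr x => pr ++ [pr.getLast?.getD 0 + x]) [0]
      (List.range c).foldl (fun (b : Int) (j : Nat) =>
        max b ((PySem.List.pyGet? pref ((j : Int) + w)).getD 0 -
               (PySem.List.pyGet? pref (j : Int)).getD 0)) best) 0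

-- ===== PRECONDITION & SPEC =====
def Spec_max_sum_from_list (lst : List Int) (n : Int) (s : Int) (out : Int) : Prop := out = max_sum_from_list_alt lst n s
instance (lst : List Int) (n : Int) (s : Int) (out : Int) : Decidable (Spec_max_sum_from_list lst n s out) := by unfold Spec_max_sum_from_list; infer_instance

-- ===== CLAIM (what is proved, stated in full; the proofs are below) =====
def Claim_equal_max_sum_from_list : Prop := ∀ (lst : List Int) (n : Int) (s : Int), Dom_max_sum_from_list lst n s → Spec_max_sum_from_list lst n s (max_sum_from_list lst n s)

-- ===== LEMMAS AND PROOFS =====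

-- proof-only abbreviations
def pvPos (lst : List Int) (s i : Int) (t : Nat) : Int := (i + (t : Int) * s) % (lst.length : Int)
def pvG (lst : List Int) (s : Int) : Nat := Int.gcd (lst.length : Int) s
def pvCyc (lst : List Int) (s : Int) : Nat := lst.length / pvG lst s
def pvW (lst : List Int) (s : Int) (w : Nat) (i : Int) : Int :=
  ∑ u ∈ Finset.range w, pvGetI lst (pvPos lst s i u)
def pvPrefList (zs : List Int) : List Int :=
  (List.range (zs.length + 1)).map (fun k => (zs.take k).sum)

theorem pvBGcd_eq (a b : Nat) : pvBGcd a b = Nat.gcd b a := by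
  induction b using Nat.strong_induction_on generalizing a with
  | _ b ih =>
    rw [pvBGcd]
    split
    · rename_i hb; subst hb; simp
    · rename_i hb
      rw [ih (a % b) (Nat.mod_lt _ (Nat.pos_of_ne_zero hb)), ← Nat.gcd_rec]

theorem pvG_eq (lst : List Int) (s : Int) (hL : lst.length ≠ 0) :
    pvBGcd (s.natAbs % lst.length) lst.length = pvG lst s := by
  rw [pvBGcd_eq, Nat.gcd_comm, ← Nat.gcd_rec]
  simp [pvG, Int.gcd]

theorem pvG_pos (lst : List Int) (s : Int) (hL : 0 < lst.length) : 0 < pvG lst s := by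
  have h0 : (lst.length : Int) ≠ 0 := by exact_mod_cast hL.ne'
  exact Int.gcd_pos_iff.mpr (Or.inl h0)

theorem pvG_mul_cyc (lst : List Int) (s : Int) (hL : 0 < lst.length) :
    pvG lst s * pvCyc lst s = lst.length := by
  have hdvd : pvG lst s ∣ lst.length := by
    have h := Int.gcd_dvd_left (lst.length : Int) s
    exact Int.ofNat_dvd.mp (by exact_mod_cast h)
  exact Nat.mul_div_cancel' hdvd

theorem pvCyc_pos (lst : List Int) (s : Int) (hL : 0 < lst.length) : 0 < pvCyc lst s := by
  have hdvd : pvG lst s ∣ lst.length := by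
    have h := Int.gcd_dvd_left (lst.length : Int) s
    exact Int.ofNat_dvd.mp (by exact_mod_cast h)
  exact Nat.div_pos (Nat.le_of_dvd hL hdvd) (pvG_pos lst s hL)

theorem pvDvd_iff (lst : List Int) (s : Int) (hL : 0 < lst.length) (m : Int) :
    (lst.length : Int) ∣ m * s ↔ (pvCyc lst s : Int) ∣ m := by
  have hg : 0 < pvG lst s := pvG_pos lst s hL
  have hGL : ((pvG lst s : Int)) ∣ (lst.length : Int) := by
    unfold pvG; exact Int.gcd_dvd_left _ _
  have hGs : ((pvG lst s : Int)) ∣ s := by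
    unfold pvG; exact Int.gcd_dvd_right _ _
  set G : Int := (pvG lst s : Int) with hGdef
  set c : Int := (pvCyc lst s : Int) with hcdef
  have hGne : G ≠ 0 := by rw [hGdef]; exact_mod_cast hg.ne'
  have hLGc : (lst.length : Int) = G * c := by
    rw [hGdef, hcdef]
    exact_mod_cast (pvG_mul_cyc lst s hL).symm
  obtain ⟨s', hs'⟩ := hGs
  have hdivL : (lst.length : Int) / G = c := by
    rw [hLGc, Int.mul_ediv_cancel_left _ hGne]
  have hdivs : s / G = s' := by
    rw [hs', Int.mul_ediv_cancel_left _ hGne]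
  have hcop : Int.gcd c s' = 1 := by
    have h1 : Int.gcd (lst.length : Int) s = pvG lst s := rfl
    have := Int.gcd_div_gcd_div_gcd (i := (lst.length : Int)) (j := s) (by rw [h1]; exact hg)
    rw [h1] at this
    rw [← hGdef] at this
    rwa [hdivL, hdivs] at this
  constructor
  · intro h
    rw [hLGc, hs'] at h
    have h2 : G * c ∣ G * (m * s') := by
      have harr : m * (G * s') = G * (m * s') := by ring
      rwa [harr] at h
    have h3 : c ∣ m * s' := (mul_dvd_mul_iff_left hGne).mp h2
    exact (Int.isCoprime_iff_gcd_eq_one.mpr hcop).dvd_of_dvd_mul_right h3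
  · rintro ⟨t, rfl⟩
    exact ⟨t * s', by rw [hLGc, hs']; ring⟩

theorem pvPos_eq_iff (lst : List Int) (s i : Int) (hL : 0 < lst.length) (j k : Nat) :
    pvPos lst s i j = pvPos lst s i k ↔ (pvCyc lst s : Int) ∣ (j : Int) - (k : Int) := by
  unfold pvPos
  rw [Int.emod_eq_emod_iff_emod_sub_eq_zero]
  have harith : (i + (j : Int) * s) - (i + (k : Int) * s) = ((j : Int) - (k : Int)) * s := by ring
  rw [harith]
  constructor
  · intro h
    exact (pvDvd_iff lst s hL _).mp (Int.dvd_of_emod_eq_zero h)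
  · intro h
    exact Int.emod_eq_zero_of_dvd ((pvDvd_iff lst s hL _).mpr h)

theorem pvPos_shift (lst : List Int) (s i : Int) (j u : Nat) :
    pvPos lst s (pvPos lst s i j) u = pvPos lst s i (j + u) := by
  unfold pvPos
  rw [Int.emod_add_emod]
  congr 1
  push_cast
  ring

theorem pvPos_nonneg (lst : List Int) (s i : Int) (hL : 0 < lst.length) (t : Nat) :
    0 ≤ pvPos lst s i t ∧ pvPos lst s i t < (lst.length : Int) := by
  have hne : (lst.length : Int) ≠ 0 := by exact_mod_cast hL.ne'
  exact ⟨Int.emod_nonneg _ hne, Int.emod_lt_of_pos _ (by exact_mod_cast hL)⟩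

theorem pvPos_self (lst : List Int) (s i : Int) (h0 : 0 ≤ i) (h1 : i < (lst.length : Int)) :
    pvPos lst s i 0 = i := by
  unfold pvPos
  simp only [Nat.cast_zero, zero_mul, add_zero]
  exact Int.emod_eq_of_lt h0 h1

-- A's inner loop computes a window sum of length min fuel c
theorem pvAInner_spec (lst : List Int) (s i : Int) (hL : 0 < lst.length) :
    ∀ (f j : Nat) (cur : Int) (vis : PySem.Set Int), j ≤ pvCyc lst s →
    (∀ x, x ∈ vis ↔ ∃ k, k < j ∧ x = pvPos lst s i k) →
    pvAInner lst s f cur vis (pvPos lst s i j)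
      = cur + ∑ u ∈ Finset.range (min f (pvCyc lst s - j)), pvGetI lst (pvPos lst s i (j + u)) := by
  intro f
  induction f with
  | zero =>
    intro j cur vis hj hvis
    simp [pvAInner]
  | succ f ih =>
    intro j cur vis hj hvis
    have hc := pvCyc_pos lst s hL
    rw [pvAInner]
    by_cases hjc : j = pvCyc lst s
    · have hmem : pvPos lst s i j ∈ vis := by
        rw [hvis]
        refine ⟨0, by omega, ?_⟩
        rw [pvPos_eq_iff lst s i hL]
        subst hjc
        simp
      rw [if_pos ((PySem.Set.contains_iff vis _).mpr hmem)]
      subst hjc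
      simp
    · have hjlt : j < pvCyc lst s := lt_of_le_of_ne hj hjc
      have hnmem : pvPos lst s i j ∉ vis := by
        rw [hvis]
        rintro ⟨k, hk, hkeq⟩
        rw [pvPos_eq_iff lst s i hL] at hkeq
        have hpos : (0 : Int) < (j : Int) - (k : Int) := by omega
        have := Int.le_of_dvd hpos hkeq
        omega
      rw [if_neg (fun hcont => hnmem ((PySem.Set.contains_iff vis _).mp hcont))]
      have hstep : ((pvPos lst s i j) + s) % (lst.length : Int) = pvPos lst s i (j+1) := by
        have h1 : pvPos lst s (pvPos lst s i j) 1 = pvPos lst s i (j+1) := pvPos_shift lst s i j 1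
        rw [← h1]
        unfold pvPos
        norm_num
      show pvAInner lst s f (cur + pvGetI lst (pvPos lst s i j))
          (PySem.Set.add vis (pvPos lst s i j)) ((pvPos lst s i j + s) % (lst.length : Int)) = _
      rw [hstep]
      rw [ih (j+1) (cur + pvGetI lst (pvPos lst s i j)) (PySem.Set.add vis (pvPos lst s i j))
          (by omega) ?_]
      · have hmin : min (f+1) (pvCyc lst s - j) = min f (pvCyc lst s - (j+1)) + 1 := by omega
        rw [hmin, Finset.sum_range_succ']
        have hcongr : ∀ u ∈ Finset.range (min f (pvCyc lst s - (j+1))),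
            pvGetI lst (pvPos lst s i (j+1+u)) = pvGetI lst (pvPos lst s i (j+(u+1))) := by
          intro u _
          rw [show j+1+u = j+(u+1) from by omega]
        rw [Finset.sum_congr rfl hcongr]
        simp only [Nat.add_zero]
        ring
      · intro x
        rw [PySem.Set.mem_add, hvis]
        constructor
        · rintro (⟨k, hk, rfl⟩ | rfl)
          · exact ⟨k, by omega, rfl⟩
          · exact ⟨j, by omega, rfl⟩
        · rintro ⟨k, hk, rfl⟩
          rcases Nat.lt_succ_iff_lt_or_eq.mp hk with h | h
          · exact Or.inl ⟨k, h, rfl⟩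
          · subst h; exact Or.inr rfl

theorem pvAInner_run (lst : List Int) (s : Int) (hL : 0 < lst.length) (f : Nat) (i : Nat)
    (hi : i < lst.length) :
    pvAInner lst s f 0 PySem.Set.empty (i : Int) = pvW lst s (min f (pvCyc lst s)) (i : Int) := by
  have h0 : pvPos lst s (i : Int) 0 = (i : Int) :=
    pvPos_self lst s (i : Int) (by positivity) (by exact_mod_cast hi)
  have hspec := pvAInner_spec lst s (i : Int) hL f 0 0 PySem.Set.empty (Nat.zero_le _)
    (by intro x; simp [PySem.Set.empty])
  rw [h0] at hspec
  rw [hspec]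
  simp [pvW]

theorem pvBCycle_spec (lst : List Int) (s : Int) (hL : 0 < lst.length) :
    ∀ (k : Nat) (p : Int), p.emod (lst.length : Int) = p →
    pvBCycle lst s k p = (List.range k).map (fun t => pvGetI lst (pvPos lst s p t)) := by
  intro k
  induction k with
  | zero => intro p hp; simp [pvBCycle]
  | succ k ih =>
    intro p hp
    have hp' : ((p + s).emod (lst.length : Int)).emod (lst.length : Int)
        = (p + s).emod (lst.length : Int) := Int.emod_emod_of_dvd _ dvd_rfl
    rw [pvBCycle, ih _ hp', List.range_succ_eq_map, List.map_cons, List.map_map]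
    congr 1
    · have : pvPos lst s p 0 = p := by
        unfold pvPos
        simpa using hp
      rw [this]
    · apply List.map_congr_left
      intro t _
      simp only [Function.comp]
      have h1 : pvPos lst s p 1 = (p + s).emod (lst.length : Int) := by
        unfold pvPos
        norm_num
        rfl
      have h2 := pvPos_shift lst s p 1 t
      rw [h1] at h2
      rw [h2, show 1 + t = t.succ from by omega]

theorem pvSumRange (f : Nat → Int) (n : Nat) :
    ((List.range n).map f).sum = ∑ t ∈ Finset.range n, f t := by
  induction n with
  | zero => simp
  | succ n ih => simp [List.range_succ, Finset.sum_range_succ, ih]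

theorem pvPref_last (zs : List Int) : (pvPrefList zs).getLast?.getD 0 = zs.sum := by
  unfold pvPrefList
  rw [List.getLast?_map, List.range_succ, List.getLast?_concat]
  simp

theorem pvPref_step (zs : List Int) (x : Int) :
    pvPrefList zs ++ [(pvPrefList zs).getLast?.getD 0 + x] = pvPrefList (zs ++ [x]) := by
  rw [pvPref_last]
  unfold pvPrefList
  rw [List.length_append, List.length_singleton]
  conv_rhs => rw [List.range_succ, List.map_append]
  congr 1
  · apply List.map_congr_left
    intro k hk
    rw [List.mem_range] at hk
    rw [List.take_append_of_le_length (by omega)]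
  · simp

theorem pvPref_fold (ys : List Int) : ∀ zs : List Int,
    (ys.foldl (fun pr x => pr ++ [pr.getLast?.getD 0 + x]) (pvPrefList zs)) = pvPrefList (zs ++ ys) := by
  induction ys with
  | nil => intro zs; simp
  | cons y ys ih =>
    intro zs
    rw [List.foldl_cons]
    rw [show (pvPrefList zs ++ [(pvPrefList zs).getLast?.getD 0 + y]) = pvPrefList (zs ++ [y])
        from pvPref_step zs y]
    rw [ih (zs ++ [y])]
    simp

theorem pvPref_get (zs : List Int) (k : Nat) (hk : k ≤ zs.length) :
    (PySem.List.pyGet? (pvPrefList zs) (k : Int)).getD 0 = (zs.take k).sum := by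
  unfold pvPrefList
  rw [PySem.List.pyGet?_natCast]
  rw [List.getElem?_map, List.getElem?_range (by omega)]
  simp

-- one entry of B's innermost loop is the window sum pvW of the corresponding start
theorem pvWindow (lst : List Int) (s : Int) (hL : 0 < lst.length) (r : Int)
    (hr : r.emod (lst.length : Int) = r) (j w : Nat) (hj : j < pvCyc lst s) (hw : w ≤ pvCyc lst s) :
    (PySem.List.pyGet? ((pvBCycle lst s (pvCyc lst s) r ++ pvBCycle lst s (pvCyc lst s) r).foldl
        (fun pr x => pr ++ [pr.getLast?.getD 0 + x]) [0]) ((j : Int) + (w : Int))).getD 0 -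
      (PySem.List.pyGet? ((pvBCycle lst s (pvCyc lst s) r ++ pvBCycle lst s (pvCyc lst s) r).foldl
        (fun pr x => pr ++ [pr.getLast?.getD 0 + x]) [0]) (j : Int)).getD 0
      = pvW lst s w (pvPos lst s r j) := by
  have hvals : pvBCycle lst s (pvCyc lst s) r
      = (List.range (pvCyc lst s)).map (fun t => pvGetI lst (pvPos lst s r t)) :=
    pvBCycle_spec lst s hL _ r hr
  have hdd : pvBCycle lst s (pvCyc lst s) r ++ pvBCycle lst s (pvCyc lst s) r
      = (List.range (pvCyc lst s + pvCyc lst s)).map (fun t => pvGetI lst (pvPos lst s r t)) := by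
    rw [hvals, List.range_add, List.map_append, List.map_map]
    congr 1
    apply List.map_congr_left
    intro t _
    simp only [Function.comp]
    have hper : pvPos lst s r (pvCyc lst s + t) = pvPos lst s r t := by
      rw [pvPos_eq_iff lst s r hL]
      push_cast
      simp
    rw [hper]
  have h0 : pvPrefList ([] : List Int) = [0] := by simp [pvPrefList]
  have hpref : ∀ zs : List Int,
      zs.foldl (fun pr x => pr ++ [pr.getLast?.getD 0 + x]) [0] = pvPrefList zs := by
    intro zs
    rw [← h0, pvPref_fold]
    simp
  rw [hdd, hpref]
  have hlen : ((List.range (pvCyc lst s + pvCyc lst s)).map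
      (fun t => pvGetI lst (pvPos lst s r t))).length = pvCyc lst s + pvCyc lst s := by simp
  rw [show ((j : Int) + (w : Int)) = (((j + w : Nat)) : Int) by push_cast; ring]
  rw [pvPref_get _ (j + w) (by rw [hlen]; omega)]
  rw [pvPref_get _ j (by rw [hlen]; omega)]
  rw [← List.map_take, List.take_range, min_eq_left (by omega : j + w ≤ pvCyc lst s + pvCyc lst s)]
  rw [← List.map_take, List.take_range, min_eq_left (by omega : j ≤ pvCyc lst s + pvCyc lst s)]
  rw [pvSumRange, pvSumRange]
  rw [← Finset.sum_Ico_eq_sub _ (show j ≤ j + w by omega)]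
  rw [Finset.sum_Ico_eq_sum_range]
  simp only [Nat.add_sub_cancel_left]
  unfold pvW
  apply Finset.sum_congr rfl
  intro u _
  rw [pvPos_shift]

-- generic fold-max helpers
theorem pvFoldl_ge_init {α : Type} {g : Int → α → Int} (h : ∀ b x, b ≤ g b x) :
    ∀ (l : List α) (a : Int), a ≤ l.foldl g a := by
  intro l
  induction l with
  | nil => intro a; simp
  | cons x l ih => intro a; exact le_trans (h a x) (ih (g a x))

theorem pvFoldl_ge_elem {α : Type} {g : Int → α → Int} (h : ∀ b x, b ≤ g b x)
    {x : α} {v : Int} (hv : ∀ b, v ≤ g b x) :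
    ∀ (l : List α) (a : Int), x ∈ l → v ≤ l.foldl g a := by
  intro l
  induction l with
  | nil => intro a hx; simp at hx
  | cons y l ih =>
    intro a hx
    rcases List.mem_cons.mp hx with rfl | hmem
    · exact le_trans (hv a) (pvFoldl_ge_init h l (g a x))
    · exact ih (g a y) hmem

theorem pvFoldl_le_bound {α : Type} {g : Int → α → Int} {M : Int} :
    ∀ (l : List α) (a : Int), (∀ b x, x ∈ l → b ≤ M → g b x ≤ M) → a ≤ M → l.foldl g a ≤ M := by
  intro l
  induction l with
  | nil => intro a _ ha; simpa using ha
  | cons x l ih =>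
    intro a hstep ha
    exact ih (g a x) (fun b y hy hb => hstep b y (List.mem_cons_of_mem _ hy) hb)
      (hstep a x List.mem_cons_self ha)

theorem pvEq_of_dvd_bounded (d a b : Int) (hd : d ∣ a - b) (h0a : 0 ≤ a) (had : a < d)
    (h0b : 0 ≤ b) (hbd : b < d) : a = b := by
  have h1 : a % d = b % d := Int.emod_eq_emod_iff_emod_sub_eq_zero.mpr (Int.emod_eq_zero_of_dvd hd)
  rwa [Int.emod_eq_of_lt h0a had, Int.emod_eq_of_lt h0b hbd] at h1

theorem pvSurj (lst : List Int) (s : Int) (hL : 0 < lst.length) (i : Nat) (hi : i < lst.length) :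
    ∃ r, r < pvG lst s ∧ ∃ j, j < pvCyc lst s ∧ pvPos lst s (r : Int) j = (i : Int) := by
  have hgpos := pvG_pos lst s hL
  have hcpos := pvCyc_pos lst s hL
  have hgc := pvG_mul_cyc lst s hL
  have hgs : ((pvG lst s : Int)) ∣ s := by unfold pvG; exact Int.gcd_dvd_right _ _
  have hgL : ((pvG lst s : Int)) ∣ (lst.length : Int) := by unfold pvG; exact Int.gcd_dvd_left _ _
  have hdiff : ∀ (r : Int) (j : Nat), ((pvG lst s : Int)) ∣ (pvPos lst s r j - r) := by
    intro r j
    unfold pvPos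
    rw [Int.emod_def]
    have harith : r + (j : Int) * s - (lst.length : Int) * ((r + (j : Int) * s) / (lst.length : Int)) - r
        = (j : Int) * s - (lst.length : Int) * ((r + (j : Int) * s) / (lst.length : Int)) := by ring
    rw [harith]
    exact dvd_sub (Dvd.dvd.mul_left hgs _) (Dvd.dvd.mul_right hgL _)
  have hFlt : ∀ p : ℕ × ℕ, (pvPos lst s (p.1 : Int) p.2).toNat < lst.length := by
    intro p
    have := pvPos_nonneg lst s (p.1 : Int) hL p.2
    omega
  have hinj : Set.InjOn (fun p : ℕ × ℕ => (pvPos lst s (p.1 : Int) p.2).toNat)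
      ↑(Finset.range (pvG lst s) ×ˢ Finset.range (pvCyc lst s)) := by
    intro p hp q hq hFeq
    simp only [Finset.coe_product, Set.mem_prod, Finset.mem_coe, Finset.mem_range] at hp hq
    have h0p := pvPos_nonneg lst s (p.1 : Int) hL p.2
    have h0q := pvPos_nonneg lst s (q.1 : Int) hL q.2
    simp only at hFeq
    have hIeq : pvPos lst s (p.1 : Int) p.2 = pvPos lst s (q.1 : Int) q.2 := by omega
    have hd1 := hdiff (p.1 : Int) p.2
    have hd2 := hdiff (q.1 : Int) q.2
    rw [hIeq] at hd1
    have hdsub := dvd_sub hd2 hd1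
    have harith2 : (pvPos lst s (q.1 : Int) q.2 - (q.1 : Int))
        - (pvPos lst s (q.1 : Int) q.2 - (p.1 : Int)) = (p.1 : Int) - (q.1 : Int) := by ring
    rw [harith2] at hdsub
    have heq1 : ((p.1 : Int)) = (q.1 : Int) :=
      pvEq_of_dvd_bounded _ _ _ hdsub (by positivity) (by exact_mod_cast hp.1)
        (by positivity) (by exact_mod_cast hq.1)
    have hp1 : p.1 = q.1 := by exact_mod_cast heq1
    rw [hp1] at hIeq
    have hdvd2 := (pvPos_eq_iff lst s (q.1 : Int) hL p.2 q.2).mp hIeq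
    have heq2 : ((p.2 : Int)) = (q.2 : Int) :=
      pvEq_of_dvd_bounded _ _ _ hdvd2 (by positivity) (by exact_mod_cast hp.2)
        (by positivity) (by exact_mod_cast hq.2)
    exact Prod.ext hp1 (by exact_mod_cast heq2)
  have hsub : Finset.image (fun p : ℕ × ℕ => (pvPos lst s (p.1 : Int) p.2).toNat)
      (Finset.range (pvG lst s) ×ˢ Finset.range (pvCyc lst s)) ⊆ Finset.range lst.length := by
    intro x hx
    rw [Finset.mem_image] at hx
    obtain ⟨p, _, rfl⟩ := hx
    exact Finset.mem_range.mpr (hFlt p)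
  have hcard : (Finset.range (pvG lst s) ×ˢ Finset.range (pvCyc lst s)).card = lst.length := by
    rw [Finset.card_product, Finset.card_range, Finset.card_range, hgc]
  have himg : Finset.image (fun p : ℕ × ℕ => (pvPos lst s (p.1 : Int) p.2).toNat)
      (Finset.range (pvG lst s) ×ˢ Finset.range (pvCyc lst s)) = Finset.range lst.length :=
    Finset.eq_of_subset_of_card_le hsub
      (by rw [Finset.card_range, Finset.card_image_of_injOn hinj, hcard])
  have hi' : i ∈ Finset.image (fun p : ℕ × ℕ => (pvPos lst s (p.1 : Int) p.2).toNat)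
      (Finset.range (pvG lst s) ×ˢ Finset.range (pvCyc lst s)) := by
    rw [himg]; exact Finset.mem_range.mpr hi
  rw [Finset.mem_image] at hi'
  obtain ⟨p, hp, hFp⟩ := hi'
  simp only [Finset.mem_product, Finset.mem_range] at hp
  refine ⟨p.1, hp.1, p.2, hp.2, ?_⟩
  have h0 := pvPos_nonneg lst s (p.1 : Int) hL p.2
  omega

theorem pvFoldl_max_zero (l : List Nat) :
    l.foldl (fun (mx : Int) (_ : Nat) => max mx 0) 0 = 0 := by
  induction l with
  | nil => rfl
  | cons x l ih => simpa using ih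

-- ===== VERDICT (by name: the statement is the Claim_ definition above) =====
theorem max_sum_from_list_spec : Claim_equal_max_sum_from_list := by
  unfold Claim_equal_max_sum_from_list
  intro lst n s _
  unfold Spec_max_sum_from_list
  by_cases hL0 : lst.length = 0
  · simp [max_sum_from_list, max_sum_from_list_alt, hL0]
  by_cases hn0 : n ≤ 0
  · have hB : max_sum_from_list_alt lst n s = 0 := by
      simp only [max_sum_from_list_alt]
      rw [if_pos (Or.inr hn0)]
    have htn : n.toNat = 0 := by omega
    have hA : max_sum_from_list lst n s = 0 := by
      unfold max_sum_from_list
      rw [htn]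
      have hfun : (fun (mx : Int) (i : Nat) =>
          max mx (pvAInner lst s 0 0 PySem.Set.empty (i : Int)))
          = fun (mx : Int) (_ : Nat) => max mx 0 := by
        funext mx i; rfl
      rw [hfun, pvFoldl_max_zero]
    rw [hA, hB]
  · have hL : 0 < lst.length := Nat.pos_of_ne_zero hL0
    have hn : 0 < n := by omega
    have hc := pvCyc_pos lst s hL
    have hgpos := pvG_pos lst s hL
    have hgle : pvG lst s ≤ lst.length := by
      refine Nat.le_of_dvd hL ?_
      have h := Int.gcd_dvd_left (lst.length : Int) s
      exact Int.ofNat_dvd.mp (by exact_mod_cast h)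
    have hwle : min n.toNat (pvCyc lst s) ≤ pvCyc lst s := min_le_right _ _
    have hA : max_sum_from_list lst n s
        = (List.range lst.length).foldl
            (fun (mx : Int) (i : Nat) => max mx (pvW lst s (min n.toNat (pvCyc lst s)) (i : Int))) 0 := by
      unfold max_sum_from_list
      apply PySem.List.foldl_congr_mem
      intro acc i hi
      rw [List.mem_range] at hi
      rw [pvAInner_run lst s hL n.toNat i hi]
    have hB : max_sum_from_list_alt lst n s
        = (List.range (pvG lst s)).foldl (fun (best : Int) (r : Nat) =>
            (List.range (pvCyc lst s)).foldl
              (fun (b : Int) (j : Nat) =>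
                max b (pvW lst s (min n.toNat (pvCyc lst s)) (pvPos lst s (r : Int) j)))
              best) 0 := by
      simp only [max_sum_from_list_alt]
      rw [if_neg (not_or.mpr ⟨hL0, by omega⟩)]
      rw [pvG_eq lst s hL0]
      rw [show lst.length / pvG lst s = pvCyc lst s from rfl]
      rw [show min n ((pvCyc lst s : Nat) : Int) = ((min n.toNat (pvCyc lst s) : Nat) : Int) by omega]
      apply PySem.List.foldl_congr_mem
      intro best r hr
      rw [List.mem_range] at hr
      have hrmod : ((r : Nat) : Int).emod (lst.length : Int) = ((r : Nat) : Int) := by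
        apply Int.emod_eq_of_lt (by positivity)
        exact_mod_cast lt_of_lt_of_le hr hgle
      apply PySem.List.foldl_congr_mem
      intro b j hj
      rw [List.mem_range] at hj
      rw [pvWindow lst s hL (r : Int) hrmod j (min n.toNat (pvCyc lst s)) hj hwle]
    rw [hA, hB]
    apply le_antisymm
    · refine pvFoldl_le_bound _ _ ?_ ?_
      · intro b i hi hb
        rw [List.mem_range] at hi
        obtain ⟨r, hrg, j, hjc, hpos⟩ := pvSurj lst s hL i hi
        apply max_le hb
        rw [← hpos]
        refine pvFoldl_ge_elem ?_ ?_ _ 0 (List.mem_range.mpr hrg)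
        · intro b' x
          exact pvFoldl_ge_init (fun b2 j2 => le_max_left _ _) _ b'
        · intro best
          exact pvFoldl_ge_elem
            (g := fun (b2 : Int) (j2 : Nat) =>
              max b2 (pvW lst s (min n.toNat (pvCyc lst s)) (pvPos lst s (r : Int) j2)))
            (fun b2 j2 => le_max_left _ _) (fun b2 => le_max_right _ _)
            _ best (List.mem_range.mpr hjc)
      · exact pvFoldl_ge_init
          (fun b x => pvFoldl_ge_init (fun b2 j2 => le_max_left _ _) _ b) _ 0
    · refine pvFoldl_le_bound _ _ ?_ ?_
      · intro best r hrmem hbest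
        refine pvFoldl_le_bound _ _ ?_ hbest
        intro b j hjmem hbA
        apply max_le hbA
        have h0 := pvPos_nonneg lst s (r : Int) hL j
        have hidx : (pvPos lst s (r : Int) j).toNat < lst.length := by omega
        have hcast : ((pvPos lst s (r : Int) j).toNat : Int) = pvPos lst s (r : Int) j := by omega
        rw [← hcast]
        exact pvFoldl_ge_elem
          (g := fun (mx : Int) (i : Nat) =>
            max mx (pvW lst s (min n.toNat (pvCyc lst s)) (i : Int)))
          (fun b2 x2 => le_max_left _ _) (fun b2 => le_max_right _ _)
          _ 0 (List.mem_range.mpr hidx)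
      · exact pvFoldl_ge_init (fun b x => le_max_left _ _) _ 0
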